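-- pv_equiv track=rewrite | github.com/Pilar-33/Parciales_Resueltos | parcial/ejercicio/funciones.py | calcular_cantidad_total
-- ===== SOURCE A (Python) =====
-- def calcular_cantidad_total(existencias: list, depositos: list) -> list:
--     totales = []
--     suma = 0
--     for i in range(len(depositos)):
--         for j in range(len(existencias)):
--             suma += existencias[i][j]
--         totales += [suma]
--     return totales
-- ===== SOURCE B (Python) =====
-- from itertools import accumulate
--
-- def calcular_cantidad_total(existencias: list, depositos: list) -> list:
--     n = len(existencias)
--     filas = [sum(existencias[i][j] for j in range(n)) for i in range(len(depositos))]
--     return list(accumulate(filas))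
-- ===== Notes on version B (the rewrite author's own statement) =====
-- stated objective: simpler
-- what changed: Replaces the single running-total double loop with per-row comprehension sums followed by itertools.accumulate for the cumulative list.
import Mathlib
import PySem

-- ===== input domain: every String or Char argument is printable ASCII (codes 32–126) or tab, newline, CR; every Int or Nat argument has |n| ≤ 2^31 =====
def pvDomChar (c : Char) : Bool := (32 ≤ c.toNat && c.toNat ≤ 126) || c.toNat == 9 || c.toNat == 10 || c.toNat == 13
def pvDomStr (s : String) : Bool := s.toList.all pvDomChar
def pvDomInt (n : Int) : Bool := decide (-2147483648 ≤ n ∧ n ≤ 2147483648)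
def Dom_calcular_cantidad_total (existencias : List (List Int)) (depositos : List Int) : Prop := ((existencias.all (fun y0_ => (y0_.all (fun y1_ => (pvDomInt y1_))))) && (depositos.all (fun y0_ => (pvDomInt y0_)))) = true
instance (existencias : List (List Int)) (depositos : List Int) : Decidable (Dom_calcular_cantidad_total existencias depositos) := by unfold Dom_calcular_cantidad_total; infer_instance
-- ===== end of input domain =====

-- B replaces A's running-total double loop by per-row slice sums then a cumulative sum (simpler decomposition, same cost).

-- ===== PORT A =====
-- Literal port of A's nested index loops; pyGetD's defaults are never used under Pre_ (indices are in range there).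
def calcular_cantidad_total (existencias : List (List Int)) (depositos : List Int) : List Int :=
  ((PySem.List.pyRange 0 (depositos.length) 1).foldl
    (fun (st : List Int × Int) i =>
      let suma := (PySem.List.pyRange 0 (existencias.length) 1).foldl
        (fun s j => s + PySem.List.pyGetD (PySem.List.pyGetD existencias i []) j 0) st.2
      (st.1 ++ [suma], suma))
    ([], 0)).1

-- ===== PORT B =====
-- list(accumulate(filas)) with running sum acc
def pvCumsum : Int → List Int → List Int
  | _, [] => []
  | acc, x :: xs => (acc + x) :: pvCumsum (acc + x) xs

-- filas = [sum(existencias[i][j] for j in range(n)) for i in range(len(depositos))]; n = len(existencias) inlined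
def calcular_cantidad_total_alt (existencias : List (List Int)) (depositos : List Int) : List Int :=
  pvCumsum 0 ((PySem.List.pyRange 0 (depositos.length) 1).map
    (fun i => ((PySem.List.pyRange 0 (existencias.length) 1).map
      (fun j => PySem.List.pyGetD (PySem.List.pyGetD existencias i []) j 0)).sum))

-- ===== PRECONDITION & SPEC =====
-- Pre_ excludes exactly the inputs where A raises IndexError: more depósitos than rows,
-- or a used row shorter than len(existencias) (when existencias = [] nothing is indexed and A returns).
def Pre_calcular_cantidad_total (existencias : List (List Int)) (depositos : List Int) : Prop :=
  existencias.length = 0 ∨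
  (depositos.length ≤ existencias.length ∧
   ∀ row ∈ existencias.take depositos.length, existencias.length ≤ row.length)
instance (existencias : List (List Int)) (depositos : List Int) : Decidable (Pre_calcular_cantidad_total existencias depositos) := by unfold Pre_calcular_cantidad_total; infer_instance

def pvWitness_calcular_cantidad_total : List (List Int) × List Int := ([[1, 2], [3, 4]], [7, 8])

def Spec_calcular_cantidad_total (existencias : List (List Int)) (depositos : List Int) (out : List Int) : Prop := out = calcular_cantidad_total_alt existencias depositos
instance (existencias : List (List Int)) (depositos : List Int) (out : List Int) : Decidable (Spec_calcular_cantidad_total existencias depositos out) := by unfold Spec_calcular_cantidad_total; infer_instance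

-- ===== CLAIM (what is proved, stated in full; the proofs are below) =====
def Claim_equal_calcular_cantidad_total : Prop := ∀ (existencias : List (List Int)) (depositos : List Int), Dom_calcular_cantidad_total existencias depositos → Pre_calcular_cantidad_total existencias depositos → Spec_calcular_cantidad_total existencias depositos (calcular_cantidad_total existencias depositos)

-- ===== LEMMAS AND PROOFS =====

-- cumulative sum appended one element at the right
lemma pvCumsum_append_singleton (R : List Int) (a x : Int) :
    pvCumsum a (R ++ [x]) = pvCumsum a R ++ [a + R.sum + x] := by
  induction R generalizing a with
  | nil => simp [pvCumsum]
  | cons y ys ih => simp [pvCumsum, ih, add_assoc]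

-- inner loop: summing row[j] for j in range(n), n ≤ len(row), adds (row.take n).sum
lemma pv_inner (row : List Int) (n : Nat) (h : n ≤ row.length) (s : Int) :
    (PySem.List.pyRange 0 (n : Int) 1).foldl (fun s j => s + PySem.List.pyGetD row j 0) s
      = s + (row.take n).sum := by
  induction n generalizing s with
  | zero => simp
  | succ m ih =>
    have hm : m ≤ row.length := Nat.le_of_succ_le h
    have hcast : ((m + 1 : Nat) : Int) = (m : Int) + 1 := by push_cast; ring
    rw [hcast, PySem.List.pyRange_one_succ_right (by exact_mod_cast Nat.zero_le m),
        List.foldl_append, ih hm]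
    have hget : PySem.List.pyGetD row (m : Int) 0 = row[m]'(by omega) := by
      rw [PySem.List.pyGetD_eq_getElem row 0 (by exact_mod_cast Nat.zero_le m)
            (by exact_mod_cast h)]
      simp
    have htake : row.take (m + 1) = row.take m ++ [row[m]'(by omega)] :=
      List.take_succ_eq_append_getElem (by omega)
    simp only [List.foldl_cons, List.foldl_nil, hget, htake, List.sum_append,
      List.sum_cons, List.sum_nil]
    ring

-- inner comprehension: [row[j] for j in range(n)] = row.take n when n ≤ len(row)
lemma pv_inner_map (row : List Int) (n : Nat) (h : n ≤ row.length) :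
    (PySem.List.pyRange 0 (n : Int) 1).map (fun j => PySem.List.pyGetD row j 0)
      = row.take n := by
  induction n with
  | zero => simp
  | succ m ih =>
    have hm : m ≤ row.length := Nat.le_of_succ_le h
    have hcast : ((m + 1 : Nat) : Int) = (m : Int) + 1 := by push_cast; ring
    rw [hcast, PySem.List.pyRange_one_succ_right (by exact_mod_cast Nat.zero_le m),
        List.map_append, ih hm, List.take_succ_eq_append_getElem (by omega)]
    have hget : PySem.List.pyGetD row (m : Int) 0 = row[m]'(by omega) := by
      rw [PySem.List.pyGetD_eq_getElem row 0 (by exact_mod_cast Nat.zero_le m)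
            (by exact_mod_cast h)]
      simp
    simp [hget]

-- outer comprehension: [f(existencias[i]) for i in range(d)] = map over take d when d ≤ len
lemma pv_outer_map (e : List (List Int)) (d : Nat) (f : List Int → Int)
    (h : d ≤ e.length) :
    (PySem.List.pyRange 0 (d : Int) 1).map (fun i => f (PySem.List.pyGetD e i []))
      = (e.take d).map f := by
  induction d with
  | zero => simp
  | succ m ih =>
    have hm : m ≤ e.length := Nat.le_of_succ_le h
    have hcast : ((m + 1 : Nat) : Int) = (m : Int) + 1 := by push_cast; ring
    rw [hcast, PySem.List.pyRange_one_succ_right (by exact_mod_cast Nat.zero_le m),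
        List.map_append, ih hm, List.take_succ_eq_append_getElem (by omega)]
    have hget : PySem.List.pyGetD e (m : Int) [] = e[m]'(by omega) := by
      rw [PySem.List.pyGetD_eq_getElem e [] (by exact_mod_cast Nat.zero_le m)
            (by exact_mod_cast h)]
      simp
    have hms : List.take (m + 1) (List.map f e)
        = List.take m (List.map f e) ++ [(List.map f e)[m]'(by simpa using h)] :=
      List.take_succ_eq_append_getElem (by simpa using h)
    simp [hget, hms]

-- outer loop invariant
lemma pv_outer (existencias : List (List Int)) (d : Nat)
    (hd : d ≤ existencias.length)
    (hrows : ∀ row ∈ existencias.take d, existencias.length ≤ row.length)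
    (acc : List Int) (s : Int) :
    (PySem.List.pyRange 0 (d : Int) 1).foldl
      (fun (st : List Int × Int) i =>
        let suma := (PySem.List.pyRange 0 (existencias.length : Int) 1).foldl
          (fun s j => s + PySem.List.pyGetD (PySem.List.pyGetD existencias i []) j 0) st.2
        (st.1 ++ [suma], suma))
      (acc, s)
    = (acc ++ pvCumsum s ((existencias.take d).map (fun row => (row.take existencias.length).sum)),
       s + ((existencias.take d).map (fun row => (row.take existencias.length).sum)).sum) := by
  induction d generalizing acc s with
  | zero => simp [PySem.List.pyRange_zero_nat, pvCumsum]
  | succ m ih =>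
    have hm : m ≤ existencias.length := Nat.le_of_succ_le hd
    have hrm : ∀ row ∈ existencias.take m, existencias.length ≤ row.length := by
      intro row hr
      exact hrows row ((List.take_sublist_take_left (Nat.le_succ m)).mem hr)
    have hcast : ((m + 1 : Nat) : Int) = (m : Int) + 1 := by push_cast; ring
    rw [hcast, PySem.List.pyRange_one_succ_right (by exact_mod_cast Nat.zero_le m),
        List.foldl_append, ih hm hrm]
    have htake : existencias.take (m + 1) = existencias.take m ++ [existencias[m]'(by omega)] :=
      List.take_succ_eq_append_getElem (by omega)
    have hmem : existencias[m]'(by omega) ∈ existencias.take (m + 1) := by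
      rw [htake]
      exact List.mem_append_right _ (by exact List.mem_singleton.mpr rfl)
    have hrowlen : existencias.length ≤ (existencias[m]'(by omega)).length := hrows _ hmem
    have hget : PySem.List.pyGetD existencias (m : Int) [] = existencias[m]'(by omega) := by
      rw [PySem.List.pyGetD_eq_getElem existencias [] (by exact_mod_cast Nat.zero_le m)
            (by exact_mod_cast hd)]
      simp
    simp only [List.foldl_cons, List.foldl_nil, hget, pv_inner _ _ hrowlen, htake,
      List.map_append, List.map_cons, List.map_nil, pvCumsum_append_singleton, List.sum_append,
      List.sum_cons, List.sum_nil]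
    rw [Prod.mk.injEq]
    exact ⟨by rw [List.append_assoc], by ring⟩

-- with no rows, A's step just re-appends the unchanged running total
lemma pv_zero_fold (l : List Int) (acc : List Int) (s : Int) :
    l.foldl (fun (st : List Int × Int) _ => (st.1 ++ [st.2], st.2)) (acc, s)
      = (acc ++ pvCumsum s (l.map fun _ => (0 : Int)), s) := by
  induction l generalizing acc with
  | nil => simp [pvCumsum]
  | cons x xs ih => simp [ih, pvCumsum]

lemma pv_nil (depositos : List Int) :
    calcular_cantidad_total [] depositos = calcular_cantidad_total_alt [] depositos := by
  unfold calcular_cantidad_total calcular_cantidad_total_alt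
  simp only [List.length_nil, Nat.cast_zero, PySem.List.pyRange_one_eq_nil (le_refl (0 : Int)),
    List.foldl_nil, List.map_nil, List.sum_nil]
  rw [pv_zero_fold]
  simp

-- ===== VERDICT (by name: the statement is the Claim_ definition above) =====
theorem calcular_cantidad_total_spec : Claim_equal_calcular_cantidad_total := by
  intro existencias depositos _ hpre
  rcases hpre with h0 | ⟨hlen, hrows⟩
  · have he : existencias = [] := List.length_eq_zero_iff.mp h0
    exact he ▸ pv_nil depositos
  unfold Spec_calcular_cantidad_total calcular_cantidad_total calcular_cantidad_total_alt
  rw [pv_outer existencias depositos.length hlen hrows [] 0]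
  have hrw : (PySem.List.pyRange 0 (depositos.length : Int) 1).map
      (fun i => ((PySem.List.pyRange 0 (existencias.length : Int) 1).map
        (fun j => PySem.List.pyGetD (PySem.List.pyGetD existencias i []) j 0)).sum)
      = (existencias.take depositos.length).map
          (fun row => (row.take existencias.length).sum) := by
    rw [pv_outer_map existencias depositos.length
          (fun row => ((PySem.List.pyRange 0 (existencias.length : Int) 1).map
            (fun j => PySem.List.pyGetD row j 0)).sum) hlen]
    exact List.map_congr_left fun row hr => by rw [pv_inner_map row _ (hrows row hr)]
  rw [hrw]
  simp
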